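-- pv_equiv track=rewrite | github.com/MrBrantCode/unitest_baseline | mut_generate/mist_train_cf/cf_14824/solution.py | check_alphabet_order
-- ===== SOURCE A (Python) =====
-- def check_alphabet_order(s):
--     s = s.lower()
--     expected_char = 'a'
--     for char in s:
--         if char == expected_char:
--             expected_char = chr(ord(expected_char) + 1)
--         if expected_char == '{':
--             return True
--     return False
-- ===== SOURCE B (Python) =====
-- ALPHABET = 'abcdefghijklmnopqrstuvwxyz'
--
-- def check_alphabet_order(s):
--     # Phase 1: build an occurrence index, letter -> list of its positions (ascending).
--     positions = {}
--     for i, ch in enumerate(s.lower()):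
--         positions.setdefault(ch, []).append(i)
--     # Phase 2: 26 successor queries against the index.
--     prev = -1
--     for letter in ALPHABET:
--         for p in positions.get(letter, []):
--             if p > prev:
--                 prev = p
--                 break
--         else:
--             return False
--     return True
-- ===== Notes on version B (the rewrite author's own statement) =====
-- stated objective: alternative
-- what changed: B replaces A's single scan with an expected_char pointer by a two-phase algorithm: it first builds a dict index mapping each character to the ascending list of its positions, then answers 26 successor queries (first position greater than the previous match) against that index.
import Mathlib
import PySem

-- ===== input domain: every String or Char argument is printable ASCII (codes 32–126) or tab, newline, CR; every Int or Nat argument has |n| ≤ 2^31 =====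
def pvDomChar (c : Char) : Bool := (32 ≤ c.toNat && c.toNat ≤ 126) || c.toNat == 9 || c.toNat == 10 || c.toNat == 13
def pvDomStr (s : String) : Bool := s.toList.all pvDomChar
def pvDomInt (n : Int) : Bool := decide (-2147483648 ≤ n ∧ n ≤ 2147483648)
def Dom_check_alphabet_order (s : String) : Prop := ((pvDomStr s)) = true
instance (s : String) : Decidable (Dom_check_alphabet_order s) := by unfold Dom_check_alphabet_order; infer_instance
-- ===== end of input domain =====

-- B builds an occurrence index (char -> list of positions) in one pass, then answers 26
-- successor queries against it, instead of A's single scan with an expected_char pointer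
-- (alternative algorithm; same cost).


-- ===== PORT A =====
-- A's for-loop over the lowered string, carrying expected_char and the early return.
def caoLoopA : List Char → Char → Bool
  | [], _ => false
  | c :: rest, e =>
    let e' := if c == e then Char.ofNat (e.toNat + 1) else e
    if e' == '{' then true else caoLoopA rest e'

def check_alphabet_order (s : String) : Bool :=
  caoLoopA (PySem.Str.lower s).toList 'a'

-- ===== PORT B =====
-- Phase 1: 'positions.setdefault(ch, []).append(i)' over enumerate(s.lower()).
def caoBuild (cs : List Char) : PySem.Dict Char (List Int) :=
  (PySem.List.enumerate cs).foldl (fun d p => d.modify p.2 [] (· ++ [p.1])) PySem.Dict.empty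

-- Phase 2 inner loop: 'for p in …: if p > prev: break / else: return False'.
def caoFind (prev : Int) : List Int → Option Int
  | [] => none
  | p :: ps => if p > prev then some p else caoFind prev ps

-- Phase 2 outer loop over the alphabet, carrying prev.
def caoLoopB (pos : PySem.Dict Char (List Int)) : List Char → Int → Bool
  | [], _ => true
  | l :: ls, prev =>
    match caoFind prev (pos.getD l []) with
    | none => false
    | some j => caoLoopB pos ls j

def check_alphabet_order_alt (s : String) : Bool :=
  caoLoopB (caoBuild (PySem.Str.lower s).toList) "abcdefghijklmnopqrstuvwxyz".toList (-1)

-- ===== PRECONDITION & SPEC =====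
def Spec_check_alphabet_order (s : String) (out : Bool) : Prop := out = check_alphabet_order_alt s
instance (s : String) (out : Bool) : Decidable (Spec_check_alphabet_order s out) := by unfold Spec_check_alphabet_order; infer_instance

-- ===== CLAIM (what is proved, stated in full; the proofs are below) =====
def Claim_equal_check_alphabet_order : Prop := ∀ (s : String), Dom_check_alphabet_order s → Spec_check_alphabet_order s (check_alphabet_order s)

-- ===== LEMMAS AND PROOFS =====

-- proof-only intermediate: "consume a shared iterator" view of the subsequence test
def caoConsume (letter : Char) : List Char → Option (List Char)
  | [] => none
  | c :: rest => if c == letter then some rest else caoConsume letter rest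

def caoIter : List Char → List Char → Bool
  | [], _ => true
  | l :: ls, it =>
    match caoConsume l it with
    | none => false
    | some it' => caoIter ls it'

-- spec of the positions index: ascending indices of ch in cs, starting offset i0
def caoIdxs (ch : Char) : List Char → Int → List Int
  | [], _ => []
  | c :: r, i => (if c == ch then [i] else []) ++ caoIdxs ch r (i + 1)

-- ---- A-side: caoLoopA equals caoIter over the alphabet (per-k facts by case exhaustion)
theorem cao_alpha_drop (k : Nat) (hk : k ≤ 25) :
    "abcdefghijklmnopqrstuvwxyz".toList.drop k
      = Char.ofNat (97 + k) :: "abcdefghijklmnopqrstuvwxyz".toList.drop (k + 1) := by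
  interval_cases k <;> decide

theorem cao_ne_brace (k : Nat) (hk : k ≤ 25) : (Char.ofNat (97 + k) == '{') = false := by
  interval_cases k <;> decide

theorem cao_succ_brace (k : Nat) (hk : k ≤ 25) :
    (Char.ofNat ((Char.ofNat (97 + k)).toNat + 1) == '{') = (k == 25) := by
  interval_cases k <;> decide

theorem cao_succ_char (k : Nat) (hk : k ≤ 25) :
    Char.ofNat ((Char.ofNat (97 + k)).toNat + 1) = Char.ofNat (97 + (k + 1)) := by
  interval_cases k <;> decide

theorem cao_main (cs : List Char) : ∀ (k : Nat), k ≤ 25 →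
    caoLoopA cs (Char.ofNat (97 + k)) = caoIter ("abcdefghijklmnopqrstuvwxyz".toList.drop k) cs := by
  induction cs with
  | nil =>
    intro k hk
    rw [cao_alpha_drop k hk]
    rfl
  | cons c rest ih =>
    intro k hk
    rw [cao_alpha_drop k hk]
    by_cases hc : c = Char.ofNat (97 + k)
    · subst hc
      simp only [caoLoopA, caoIter, caoConsume, beq_self_eq_true, if_true,
        cao_succ_brace k hk]
      by_cases h25 : k = 25
      · subst h25
        rw [show ("abcdefghijklmnopqrstuvwxyz".toList.drop (25 + 1)) = [] from by decide]
        simp [caoIter]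
      · have hk' : k + 1 ≤ 25 := by omega
        have h25b : (k == 25) = false := by simp [h25]
        rw [h25b]
        simp only [Bool.false_eq_true, if_false]
        rw [cao_succ_char k hk, ih (k + 1) hk']
    · have hbeq : (c == Char.ofNat (97 + k)) = false := by simp [hc]
      simp only [caoLoopA, caoIter, caoConsume, hbeq, Bool.false_eq_true, if_false,
        cao_ne_brace k hk]
      rw [ih k hk, cao_alpha_drop k hk]
      simp only [caoIter]

-- ---- B-side: the built index realises caoIdxs
theorem cao_build_getD (cs : List Char) (ch : Char) :
    ∀ (i0 : Int), ((PySem.List.enumerate cs i0).filter (fun p => p.2 == ch)).map (·.1)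
      = caoIdxs ch cs i0 := by
  induction cs with
  | nil => intro i0; simp [PySem.List.enumerate_nil, caoIdxs]
  | cons c r ih =>
    intro i0
    rw [PySem.List.enumerate_cons]
    by_cases hc : c = ch
    · simp [hc, caoIdxs, ih]
    · simp [hc, caoIdxs, ih]

theorem cao_getD_build (cs : List Char) (ch : Char) :
    (caoBuild cs).getD ch [] = caoIdxs ch cs 0 := by
  unfold caoBuild
  have h := PySem.Dict.getD_foldl_modify_append
    (l := (PySem.List.enumerate cs).map Prod.swap) (c := ch)
    (d := (PySem.Dict.empty : PySem.Dict Char (List Int)))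
  rw [List.foldl_map] at h
  simp only [Prod.fst_swap, Prod.snd_swap] at h
  rw [h, List.filter_map, List.map_map]
  have h1 : ((fun p : Char × Int => p.1 == ch) ∘ Prod.swap) = (fun p : Int × Char => p.2 == ch) := rfl
  have h2 : ((fun p : Char × Int => p.2) ∘ Prod.swap) = (fun p : Int × Char => p.1) := rfl
  rw [h1, h2, cao_build_getD cs ch 0]
  simp

-- caoFind skips nothing when every index is beyond prev
theorem cao_find_head (ch : Char) : ∀ (cs : List Char) (i0 prev : Int), prev < i0 →
    caoFind prev (caoIdxs ch cs i0) = (caoIdxs ch cs i0).head? := by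
  intro cs
  induction cs with
  | nil => intro i0 prev _; rfl
  | cons c r ih =>
    intro i0 prev h
    by_cases hc : c = ch
    · simp only [caoIdxs, hc, beq_self_eq_true, if_true, List.singleton_append, caoFind,
        List.head?_cons]
      rw [if_pos h]
    · have : (c == ch) = false := by simp [hc]
      simp only [caoIdxs, this, Bool.false_eq_true, if_false, List.nil_append]
      exact ih (i0 + 1) prev (by omega)

-- caoFind on the whole index equals head? of the index of the suffix
theorem cao_find_drop (ch : Char) : ∀ (cs : List Char) (i0 : Int) (n : Nat),
    caoFind (i0 + n - 1) (caoIdxs ch cs i0) = (caoIdxs ch (cs.drop n) (i0 + n)).head? := by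
  intro cs
  induction cs with
  | nil => intro i0 n; simp [caoIdxs, caoFind]
  | cons c r ih =>
    intro i0 n
    cases n with
    | zero =>
      simp only [List.drop_zero, Nat.cast_zero, add_zero]
      exact cao_find_head ch (c :: r) i0 (i0 - 1) (by omega)
    | succ m =>
      by_cases hc : c = ch
      · simp only [caoIdxs, hc, beq_self_eq_true, if_true, List.singleton_append, caoFind]
        rw [if_neg (by push_cast; omega)]
        have := ih (i0 + 1) m
        rw [show i0 + 1 + (m : Int) - 1 = i0 + ((m : Nat) + 1 : Nat) - 1 by push_cast; ring] at this
        rw [show i0 + 1 + (m : Int) = i0 + ((m : Nat) + 1 : Nat) by push_cast; ring] at this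
        rw [this, List.drop_succ_cons]
      · have hbeq : (c == ch) = false := by simp [hc]
        simp only [caoIdxs, hbeq, Bool.false_eq_true, if_false, List.nil_append, List.drop_succ_cons]
        have := ih (i0 + 1) m
        rw [show i0 + 1 + (m : Int) - 1 = i0 + ((m : Nat) + 1 : Nat) - 1 by push_cast; ring] at this
        rw [show i0 + 1 + (m : Int) = i0 + ((m : Nat) + 1 : Nat) by push_cast; ring] at this
        exact this

-- head? of the suffix index vs consuming the iterator
theorem cao_head_consume (ch : Char) : ∀ (t : List Char) (m : Int),
    (match caoConsume ch t with
     | none => caoIdxs ch t m = []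
     | some rest => ∃ j, (caoIdxs ch t m).head? = some j ∧ m ≤ j ∧
         t.drop ((j - m).toNat + 1) = rest) := by
  intro t
  induction t with
  | nil => intro m; simp [caoConsume, caoIdxs]
  | cons c r ih =>
    intro m
    by_cases hc : c = ch
    · subst hc
      simp only [caoConsume, beq_self_eq_true, if_true, caoIdxs, List.singleton_append,
        List.head?_cons]
      exact ⟨m, rfl, le_refl m, by simp⟩
    · have hbeq : (c == ch) = false := by simp [hc]
      have hbeq' : (ch == c) = false := by simp [Ne.symm hc]
      simp only [caoConsume, Bool.false_eq_true, if_false, caoIdxs, hbeq, List.nil_append]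
      have := ih (m + 1)
      cases hcons : caoConsume ch r with
      | none => rw [hcons] at this; exact this
      | some rest =>
        rw [hcons] at this
        obtain ⟨j, hhead, hle, hdrop⟩ := this
        refine ⟨j, hhead, by omega, ?_⟩
        have : (j - m).toNat = (j - (m + 1)).toNat + 1 := by omega
        rw [this, List.drop_succ_cons, ← hdrop]

-- main B-side lemma: the query loop over the index equals the iterator-consuming loop
theorem cao_mainB (cs : List Char) : ∀ (ls : List Char) (n : Nat),
    caoLoopB (caoBuild cs) ls ((n : Int) - 1) = caoIter ls (cs.drop n) := by
  intro ls
  induction ls with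
  | nil => intro n; rfl
  | cons l ls ih =>
    intro n
    simp only [caoLoopB, caoIter, cao_getD_build]
    have hfind : caoFind ((n : Int) - 1) (caoIdxs l cs 0)
        = (caoIdxs l (cs.drop n) ((0 : Int) + n)).head? := by
      have := cao_find_drop l cs 0 n
      rw [show (0 : Int) + (n : Int) - 1 = (n : Int) - 1 by ring] at this
      exact this
    have hcons := cao_head_consume l (cs.drop n) ((0 : Int) + n)
    cases hc : caoConsume l (cs.drop n) with
    | none =>
      rw [hc] at hcons
      rw [hfind, hcons]
      rfl
    | some rest =>
      rw [hc] at hcons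
      obtain ⟨j, hhead, hle, hdrop⟩ := hcons
      rw [hfind, hhead]
      show caoLoopB (caoBuild cs) ls j = caoIter ls rest
      have hj : j = ((j.toNat + 1 : Nat) : Int) - 1 := by omega
      have hrest : cs.drop (j.toNat + 1) = rest := by
        rw [← hdrop, List.drop_drop]
        congr 1
        omega
      rw [hj, ih (j.toNat + 1), hrest]

-- ===== VERDICT (by name: the statement is the Claim_ definition above) =====
theorem check_alphabet_order_spec : Claim_equal_check_alphabet_order := by
  intro s _
  unfold Spec_check_alphabet_order check_alphabet_order check_alphabet_order_alt
  have hA := cao_main (PySem.Str.lower s).toList 0 (by omega)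
  have hB := cao_mainB (PySem.Str.lower s).toList "abcdefghijklmnopqrstuvwxyz".toList 0
  simp only [List.drop_zero] at hA hB
  rw [show ('a' : Char) = Char.ofNat (97 + 0) from rfl, hA, ← hB]
  norm_num
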